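-- pv_equiv track=rewrite | github.com/Yoonyesol/CodingTest | [프로그래머스] 코딩테스트 입문_컨트롤 제트.py | solution
-- ===== SOURCE A (Python) =====
-- def solution(s):
--     answer = []
--     s_list = s.split()
--     for i in s_list:
--         if i == "Z" and answer:
--             answer.pop()
--         elif i != "Z":
--             answer.append(int(i))
--     return sum(answer)
-- ===== SOURCE B (Python) =====
-- def solution(s):
--     total = 0
--     skip = 0
--     for tok in reversed(s.split()):
--         if tok == "Z":
--             skip += 1
--         else:
--             v = int(tok)
--             if skip > 0:
--                 skip -= 1
--             else:
--                 total += v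
--     return total
-- ===== Notes on version B (the rewrite author's own statement) =====
-- stated objective: alternative
-- what changed: Replaces A's stack (append/pop then sum) by a single reverse pass that keeps only a skip counter and a running total: a 'Z' increments skip, a number is dropped while skip>0, otherwise added.
import Mathlib
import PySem

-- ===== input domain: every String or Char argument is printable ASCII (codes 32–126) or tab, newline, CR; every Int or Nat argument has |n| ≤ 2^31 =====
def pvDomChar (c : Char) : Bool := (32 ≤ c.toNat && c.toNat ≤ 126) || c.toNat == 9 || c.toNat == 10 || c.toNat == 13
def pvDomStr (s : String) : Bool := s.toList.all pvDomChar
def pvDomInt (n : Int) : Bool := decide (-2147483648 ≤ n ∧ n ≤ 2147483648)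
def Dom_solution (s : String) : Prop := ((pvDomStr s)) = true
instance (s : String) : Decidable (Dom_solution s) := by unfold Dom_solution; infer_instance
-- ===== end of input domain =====

-- B replaces A's explicit stack with a single reverse pass keeping a skip counter and a
-- running total (alternative decomposition, O(1) extra space); return values proved equal on Pre_.

-- ===== PORT A =====
-- one loop step of A: "Z" with a nonempty stack pops, other tokens parse-and-append;
-- none = a ValueError from int(i) has occurred (excluded by Pre_solution)
def stepA (st : Option (List Int)) (i : String) : Option (List Int) :=
  match st with
  | none => none
  | some ans =>
    if i = "Z" ∧ ans ≠ [] then some ans.dropLast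
    else if i ≠ "Z" then (PySem.Int.ofStr? i).map (fun v => ans ++ [v])
    else some ans

def solution (s : String) : Int :=
  match (PySem.Str.split₀ s).foldl stepA (some []) with
  | some ans => ans.sum
  | none => 0   -- unreachable under Pre_solution (Python raised ValueError)

-- ===== PORT B =====
-- one loop step of B over the reversed token list; state = (skip, total);
-- none = a ValueError from int(tok) (excluded by Pre_solution)
def stepB (st : Option (Int × Int)) (tok : String) : Option (Int × Int) :=
  match st with
  | none => none
  | some (skip, total) =>
    if tok = "Z" then some (skip + 1, total)
    else (PySem.Int.ofStr? tok).map (fun v =>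
      if skip > 0 then (skip - 1, total) else (skip, total + v))

def solution_alt (s : String) : Int :=
  match ((PySem.Str.split₀ s).reverse.foldl stepB (some (0, 0))) with
  | some (_, total) => total
  | none => 0   -- unreachable under Pre_solution

-- ===== PRECONDITION & SPEC =====
-- Pre_ excludes inputs containing a whitespace-separated token that is neither "Z" nor a
-- valid Python int literal: there int(i) raises ValueError in both A and B.
def Pre_solution (s : String) : Prop :=
  ∀ t ∈ PySem.Str.split₀ s, t = "Z" ∨ (PySem.Int.ofStr? t).isSome = true
instance (s : String) : Decidable (Pre_solution s) := by unfold Pre_solution; infer_instance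

def pvWitness_solution : String := "1 2 Z 3"

def Spec_solution (s : String) (out : Int) : Prop := out = solution_alt s
instance (s : String) (out : Int) : Decidable (Spec_solution s out) := by unfold Spec_solution; infer_instance

-- ===== CLAIM (what is proved, stated in full; the proofs are below) =====
def Claim_equal_solution : Prop := ∀ (s : String), Dom_solution s → Pre_solution s → Spec_solution s (solution s)

-- ===== LEMMAS AND PROOFS =====

-- pure (option-free) step functions, used only for the proofs
def stAp (ans : List Int) (i : String) : List Int :=
  if i = "Z" then (if ans = [] then ans else ans.dropLast)
  else ans ++ [(PySem.Int.ofStr? i).getD 0]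

def stBp (st : Int × Int) (tok : String) : Int × Int :=
  if tok = "Z" then (st.1 + 1, st.2)
  else if st.1 > 0 then (st.1 - 1, st.2) else (st.1, st.2 + (PySem.Int.ofStr? tok).getD 0)

theorem foldA_eq_pure (l : List String)
    (h : ∀ t ∈ l, t = "Z" ∨ (PySem.Int.ofStr? t).isSome = true) (ans : List Int) :
    l.foldl stepA (some ans) = some (l.foldl stAp ans) := by
  induction l generalizing ans with
  | nil => rfl
  | cons a l ih =>
    have ha := h a (by simp)
    have hl : ∀ t ∈ l, t = "Z" ∨ (PySem.Int.ofStr? t).isSome = true :=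
      fun t ht => h t (by simp [ht])
    rcases ha with ha | ha
    · subst ha
      by_cases hne : ans = [] <;>
        simp [List.foldl_cons, stepA, stAp, hne, ih hl _]
    · rcases Option.isSome_iff_exists.mp ha with ⟨v, hv⟩
      by_cases hZ : a = "Z"
      · simp [hZ] at *
        by_cases hne : ans = [] <;> simp [stepA, stAp, hne, ih hl _]
      · simp [List.foldl_cons, stepA, stAp, hZ, hv, ih hl _]

theorem foldB_eq_pure (l : List String)
    (h : ∀ t ∈ l, t = "Z" ∨ (PySem.Int.ofStr? t).isSome = true) (st : Int × Int) :
    l.foldl stepB (some st) = some (l.foldl stBp st) := by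
  induction l generalizing st with
  | nil => rfl
  | cons a l ih =>
    have ha := h a (by simp)
    have hl : ∀ t ∈ l, t = "Z" ∨ (PySem.Int.ofStr? t).isSome = true :=
      fun t ht => h t (by simp [ht])
    rcases ha with ha | ha
    · subst ha
      simp [List.foldl_cons, stepB, stBp, ih hl _]
    · rcases Option.isSome_iff_exists.mp ha with ⟨v, hv⟩
      by_cases hZ : a = "Z"
      · simp [hZ, List.foldl_cons, stepB, stBp, ih hl _]
      · by_cases hs : st.1 > 0 <;>
          simp [List.foldl_cons, stepB, stBp, hZ, hv, hs, ih hl _]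

-- core: B's reverse pass with skip k sums A's stack with the top k elements removed
theorem core (l : List String) (k tot : Int) (hk : 0 ≤ k) :
    (l.reverse.foldl stBp (k, tot)).2 =
      tot + (((l.foldl stAp []).take ((l.foldl stAp []).length - k.toNat)).sum) := by
  induction l using List.reverseRecOn generalizing k tot with
  | nil => simp
  | append_singleton l t ih =>
    set S : List Int := l.foldl stAp [] with hS
    rw [List.reverse_append, List.reverse_singleton, List.singleton_append,
        List.foldl_cons, List.foldl_append]
    by_cases hZ : t = "Z"
    · -- a "Z": skip becomes k+1; A's stack loses its top (if any)
      subst hZ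
      simp only [stBp, reduceIte]
      rw [ih (k + 1) tot (by omega)]
      simp only [List.foldl_cons, List.foldl_nil, stAp, reduceIte, ← hS]
      by_cases hne : S = []
      · simp [hne]
      · simp only [hne, reduceIte]
        have hlen : S.dropLast.length = S.length - 1 := by
          simp [List.length_dropLast]
        have hkk : (k + 1).toNat = k.toNat + 1 := by omega
        have hmle : S.length - 1 - k.toNat ≤ S.length - 1 := Nat.sub_le _ _
        rw [hlen, hkk, List.dropLast_eq_take, List.take_take]
        have : min (S.length - 1 - k.toNat) (S.length - 1) = S.length - (k.toNat + 1) := by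
          omega
        rw [this]
    · -- a number v: skipped if k>0, else added; A's stack gains v on top
      simp only [stBp, if_neg hZ]
      have hA : (l ++ [t]).foldl stAp [] = S ++ [(PySem.Int.ofStr? t).getD 0] := by
        simp [List.foldl_append, stAp, hZ, hS]
      rw [List.foldl_append] at *
      by_cases hkpos : k > 0
      · simp only [if_pos hkpos]
        rw [ih (k - 1) tot (by omega)]
        simp only [List.foldl_cons, List.foldl_nil, stAp, if_neg hZ, ← hS]
        have hm : (S ++ [(PySem.Int.ofStr? t).getD 0]).length - k.toNat
            = S.length - (k - 1).toNat := by
          simp only [List.length_append, List.length_cons, List.length_nil]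
          omega
        rw [hm, List.take_append_of_le_length (by omega)]
      · have hk0 : k = 0 := by omega
        subst hk0
        simp only [if_neg hkpos]
        rw [ih 0 (tot + (PySem.Int.ofStr? t).getD 0) le_rfl]
        simp only [List.foldl_cons, List.foldl_nil, stAp, if_neg hZ, ← hS]
        simp [List.take_of_length_le]
        ring

-- ===== VERDICT (by name: the statement is the Claim_ definition above) =====
theorem solution_spec : Claim_equal_solution := by
  intro s _ hpre
  unfold Spec_solution solution solution_alt
  have hv : ∀ t ∈ PySem.Str.split₀ s, t = "Z" ∨ (PySem.Int.ofStr? t).isSome = true := hpre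
  have hvr : ∀ t ∈ (PySem.Str.split₀ s).reverse, t = "Z" ∨ (PySem.Int.ofStr? t).isSome = true := by
    intro t ht; exact hv t (List.mem_reverse.mp ht)
  rw [foldA_eq_pure _ hv, foldB_eq_pure _ hvr]
  have h := core (PySem.Str.split₀ s) 0 0 le_rfl
  simp only [Int.toNat_zero, Nat.sub_zero, List.take_of_length_le (le_refl _), zero_add] at h
  show (List.foldl stAp [] (PySem.Str.split₀ s)).sum
      = (List.foldl stBp (0, 0) (PySem.Str.split₀ s).reverse).2
  exact h.symm
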